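-- pv_equiv track=rewrite | github.com/Eveler/dmsic | 3dparty/ladon-repo/src/ladon/server/wsgi_application.py | probe_language
-- ===== SOURCE A (Python) =====
-- def probe_language(env,default=['en']):
--
-- 	langs = []
-- 	acceptlanguage = ""
-- 	contentlanguage = ""
--
-- 	if 'HTTP_ACCEPT_LANGUAGE' in env:
-- 		acceptlanguage = env['HTTP_ACCEPT_LANGUAGE']
-- 	elif 'ACCEPT_LANGUAGE' in env:
-- 		acceptlanguage = env['ACCEPT_LANGUAGE']
--
-- 	if 'HTTP_CONTENT_LANGUAGE' in env:
-- 		contentlanguage = env['HTTP_CONTENT_LANGUAGE']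
-- 	elif 'CONTENT_LANGUAGE' in env:
-- 		contentlanguage = env['CONTENT_LANGUAGE']
--
-- 	if not contentlanguage == "":
-- 		langsplit = contentlanguage.split(',')
-- 		for lang in langsplit:
-- 			langcode = lang.split('-')[0].lower()
-- 			if not langcode in langs:
-- 				langs.append(langcode)
--
-- 	if not acceptlanguage == "":
-- 		langsplit = acceptlanguage.split(',')
-- 		for lang in langsplit:
-- 			langcode = lang.split(';')[0].split('-')[0].lower()
-- 			if not langcode in langs:
-- 				langs.append(langcode)
--
-- 	if len(langs) == 0:
-- 		return default
-- 	else: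
-- 		return langs
-- ===== SOURCE B (Python) =====
-- def probe_language(env, default=['en']):
--     # scan a token char-by-char: lowered prefix up to the first stop character
--     def code(token, stops):
--         out = []
--         for ch in token:
--             if ch in stops:
--                 break
--             out.append(ch.lower())
--         return ''.join(out)
--
--     def header(primary, secondary):
--         for key in (primary, secondary):
--             if key in env:
--                 return env[key]
--         return ""
--
--     accept = header('HTTP_ACCEPT_LANGUAGE', 'ACCEPT_LANGUAGE')
--     content = header('HTTP_CONTENT_LANGUAGE', 'CONTENT_LANGUAGE')
--
--     codes = []
--     if content != "":
--         codes += [code(t, '-') for t in content.split(',')]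
--     if accept != "":
--         codes += [code(t, ';-') for t in accept.split(',')]
--
--     # sieve dedup: take the head, filter it out of the remainder, repeat
--     langs = []
--     while codes:
--         head = codes[0]
--         codes = [c for c in codes[1:] if c != head]
--         langs.append(head)
--     return langs if langs else default
-- ===== Notes on version B (the rewrite author's own statement) =====
-- stated objective: alternative
-- what changed: Token codes are computed by a character-level scan (lowercase each char until the first stop character) instead of split/index/lower, and A's two fused membership-checking accumulation loops are replaced by plain map passes concatenated and deduplicated by a sieve: repeatedly take the head and filter all its later duplicates out of the remaining stream.
import Mathlib
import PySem

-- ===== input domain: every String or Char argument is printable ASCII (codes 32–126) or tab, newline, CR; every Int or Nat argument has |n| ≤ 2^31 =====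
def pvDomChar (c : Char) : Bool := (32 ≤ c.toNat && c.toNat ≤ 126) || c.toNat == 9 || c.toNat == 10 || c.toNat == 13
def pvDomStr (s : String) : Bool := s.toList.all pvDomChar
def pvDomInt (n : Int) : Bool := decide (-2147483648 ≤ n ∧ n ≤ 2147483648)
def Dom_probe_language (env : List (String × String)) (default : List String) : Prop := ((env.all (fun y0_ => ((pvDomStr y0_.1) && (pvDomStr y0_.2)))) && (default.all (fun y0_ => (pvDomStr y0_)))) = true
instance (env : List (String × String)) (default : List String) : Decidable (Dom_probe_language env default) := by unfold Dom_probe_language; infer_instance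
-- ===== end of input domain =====

-- B: computes each token's code by a character-level scan (lowering chars until the first stop
-- char) instead of split/index/lower, and replaces A's fused membership-checking accumulation
-- loops with staged map passes plus a sieve dedup (take the head, filter it from the rest).


-- dict lookup: first matching key (env is a Python dict → association list)
def pvEnvGet (env : List (String × String)) (k : String) : Option String :=
  (env.find? (fun p => p.1 == k)).map (·.2)

-- s.split(sep) for a NONEMPTY literal sep: split? is none only for sep = "", so getD never fires
def pvSplit (s sep : String) : List String :=
  (PySem.Str.split? s sep).getD []

-- ===== PORT A =====
def probe_language (env : List (String × String)) (default : List String) : List String :=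
  -- 'K in env' then 'env[K]' on a dict = first match
  let acceptlanguage :=
    match pvEnvGet env "HTTP_ACCEPT_LANGUAGE" with
    | some v => v
    | none =>
      match pvEnvGet env "ACCEPT_LANGUAGE" with
      | some v => v
      | none => ""
  let contentlanguage :=
    match pvEnvGet env "HTTP_CONTENT_LANGUAGE" with
    | some v => v
    | none =>
      match pvEnvGet env "CONTENT_LANGUAGE" with
      | some v => v
      | none => ""
  let langs : List String := []
  let langs :=
    if ¬ contentlanguage = "" then
      (pvSplit contentlanguage ",").foldl (fun langs lang =>
        -- lang.split('-')[0]: split on a nonempty separator is never empty, so [0] = headD ""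
        let langcode := PySem.Str.lower ((pvSplit lang "-").headD "")
        if langcode ∈ langs then langs else langs ++ [langcode]) langs
    else langs
  let langs :=
    if ¬ acceptlanguage = "" then
      (pvSplit acceptlanguage ",").foldl (fun langs lang =>
        let langcode := PySem.Str.lower ((pvSplit ((pvSplit lang ";").headD "") "-").headD "")
        if langcode ∈ langs then langs else langs ++ [langcode]) langs
    else langs
  if langs.length = 0 then default else langs

-- ===== PORT B =====
-- Source B's `code` loop: collect ch.lower() until a stop character is hit
def pvCodeGo (stops : List Char) : List Char → List Char
  | [] => []
  | c :: rest => if c ∈ stops then [] else PySem.Chars.lowerChar c :: pvCodeGo stops rest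

def pvCode (token : String) (stops : List Char) : String :=
  String.ofList (pvCodeGo stops token.toList)

-- Source B's `header`: value of the first of the two keys present in env, else ""
def pvHeader (env : List (String × String)) (k1 k2 : String) : String :=
  match pvEnvGet env k1 with
  | some v => v
  | none =>
    match pvEnvGet env k2 with
    | some v => v
    | none => ""

-- Source B's sieve-dedup while loop: take the head, filter it out of the remainder, repeat
def pvUniq : List String → List String
  | [] => []
  | x :: xs => x :: pvUniq (xs.filter (fun y => y ≠ x))
termination_by l => l.length
decreasing_by
  refine Nat.lt_succ_of_le ?_
  rw [List.length_unattach]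
  exact le_of_le_of_eq (List.length_filter_le _ _) List.length_attach

def probe_language_alt (env : List (String × String)) (default : List String) : List String :=
  let accept := pvHeader env "HTTP_ACCEPT_LANGUAGE" "ACCEPT_LANGUAGE"
  let content := pvHeader env "HTTP_CONTENT_LANGUAGE" "CONTENT_LANGUAGE"
  let codes :=
    (if content ≠ "" then (pvSplit content ",").map (fun t => pvCode t ['-']) else []) ++
    (if accept ≠ "" then (pvSplit accept ",").map (fun t => pvCode t [';', '-']) else [])
  let langs := pvUniq codes
  if langs = [] then default else langs

-- ===== PRECONDITION & SPEC =====
def Spec_probe_language (env : List (String × String)) (default : List String) (out : List String) : Prop := out = probe_language_alt env default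
instance (env : List (String × String)) (default : List String) (out : List String) : Decidable (Spec_probe_language env default out) := by unfold Spec_probe_language; infer_instance

-- ===== CLAIM (what is proved, stated in full; the proofs are below) =====
def Claim_equal_probe_language : Prop := ∀ (env : List (String × String)) (default : List String), Dom_probe_language env default → Spec_probe_language env default (probe_language env default)

-- ===== LEMMAS AND PROOFS =====

-- splitOn.go's piece accumulator distributes out of the recursion
theorem go_acc (fuel : Nat) (sep : List Char) : ∀ (l cur : List Char) (acc : List (List Char)),
    PySem.Chars.splitOn.go sep fuel l cur acc = acc.reverse ++ PySem.Chars.splitOn.go sep fuel l cur [] := by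
  induction fuel with
  | zero =>
    intro l cur acc
    rw [PySem.Chars.splitOn.go, PySem.Chars.splitOn.go]
    simp
  | succ n ih =>
    intro l cur acc
    cases l with
    | nil =>
      rw [PySem.Chars.splitOn.go, PySem.Chars.splitOn.go]
      simp
      all_goals omega
    | cons c rest =>
      rw [PySem.Chars.splitOn.go, PySem.Chars.splitOn.go]
      by_cases h : sep.isPrefixOf (c :: rest) = true
      · simp only [h, if_true]
        rw [ih _ _ (cur.reverse :: acc), ih _ _ [cur.reverse]]
        simp
      · simp only [h]
        exact ih _ _ acc

-- the first piece of a single-character split is the takeWhile prefix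
theorem go_head (c : Char) : ∀ (fuel : Nat) (l cur : List Char), l.length ≤ fuel →
    ∃ rest, PySem.Chars.splitOn.go [c] fuel l cur []
      = (cur.reverse ++ l.takeWhile (fun x => x ≠ c)) :: rest := by
  intro fuel
  induction fuel with
  | zero =>
    intro l cur h
    have : l = [] := List.length_eq_zero_iff.mp (Nat.le_zero.mp h)
    subst this
    rw [PySem.Chars.splitOn.go]
    exact ⟨[], by simp⟩
  | succ n ih =>
    intro l cur h
    cases l with
    | nil =>
      rw [PySem.Chars.splitOn.go]
      all_goals first | omega | exact ⟨[], by simp⟩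
    | cons c' rest' =>
      rw [PySem.Chars.splitOn.go]
      by_cases hc : c' = c
      · subst hc
        have hp : List.isPrefixOf [c'] (c' :: rest') = true := by simp [List.isPrefixOf]
        simp only [hp, if_true]
        rw [go_acc]
        refine ⟨PySem.Chars.splitOn.go [c'] n (List.drop 1 (c' :: rest')) [] [], ?_⟩
        simp
      · have hp : List.isPrefixOf [c] (c' :: rest') = false := by
          simp [List.isPrefixOf]
          exact fun h' => (hc h'.symm).elim
        simp only [hp, Bool.false_eq_true, if_false]
        obtain ⟨r, hr⟩ := ih rest' (c' :: cur) (by simpa using Nat.le_of_succ_le_succ h)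
        refine ⟨r, ?_⟩
        rw [hr]
        simp [hc]

theorem splitOn_head (l : List Char) (c : Char) :
    ∃ rest, PySem.Chars.splitOn l [c] = (l.takeWhile (fun x => x ≠ c)) :: rest := by
  rw [PySem.Chars.splitOn]
  obtain ⟨r, hr⟩ := go_head c (l.length + 1) l [] (by omega)
  exact ⟨r, by simpa using hr⟩

theorem pvSplit_single (s : String) (c : Char) (sep : String) (hsep : sep.toList = [c]) :
    pvSplit s sep = (PySem.Chars.splitOn s.toList [c]).map String.ofList := by
  simp [pvSplit, PySem.Str.split?, PySem.Chars.split?, hsep]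

theorem pvSplit_head (s : String) (c : Char) (sep : String) (hsep : sep.toList = [c]) :
    (pvSplit s sep).headD "" = String.ofList (s.toList.takeWhile (fun x => x ≠ c)) := by
  rw [pvSplit_single s c sep hsep]
  obtain ⟨r, hr⟩ := splitOn_head s.toList c
  rw [hr]
  simp

theorem lower_ofList (w : List Char) :
    PySem.Str.lower (String.ofList w) = String.ofList (PySem.Chars.lower w) := by
  have h := PySem.Str.toList_lower (String.ofList w)
  rw [String.toList_ofList] at h
  rw [← h, String.ofList_toList]

-- Source B's char scan = lowered takeWhile prefix
theorem pvCodeGo_eq (stops : List Char) (l : List Char) :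
    pvCodeGo stops l = PySem.Chars.lower (l.takeWhile (fun c => ¬ c ∈ stops)) := by
  induction l with
  | nil => rfl
  | cons c rest ih =>
    by_cases h : c ∈ stops <;> simp [pvCodeGo, h, ih, PySem.Chars.lower]

-- A's content-token code expression = B's char scan with stop '-'
theorem codeA_content (t : String) :
    PySem.Str.lower ((pvSplit t "-").headD "") = pvCode t ['-'] := by
  rw [pvSplit_head t '-' "-" rfl, lower_ofList, pvCode, pvCodeGo_eq]
  have hp : (fun x : Char => decide (x ≠ '-')) = (fun c : Char => decide (¬ c ∈ ['-'])) := by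
    funext x; simp
  rw [hp]

theorem codeA_content' (t : String) :
    PySem.Str.lower ((pvSplit t "-").head?.getD "") = pvCode t ['-'] := by
  simpa using codeA_content t

-- the accept rewrite in the stage the content rewrite leaves behind
theorem codeA_accept' (t : String) :
    pvCode ((pvSplit t ";").head?.getD "") ['-'] = pvCode t [';', '-'] := by
  have h : (pvSplit t ";").head?.getD "" = String.ofList (t.toList.takeWhile (fun x => x ≠ ';')) := by
    simpa using pvSplit_head t ';' ";" rfl
  rw [h, pvCode, pvCode, String.toList_ofList, pvCodeGo_eq, pvCodeGo_eq, List.takeWhile_takeWhile]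
  have hp : (fun a : Char => decide (decide (¬ a ∈ ['-']) = true ∧ decide (a ≠ ';') = true))
      = (fun c : Char => decide (¬ c ∈ [';', '-'])) := by
    funext x; simp [and_comm]
  rw [hp]

-- A's dedup-insert loop over xs, through the code map f, is the Set.add fold over xs.map f
theorem foldl_insert_eq_add {β : Type} (f : β → String) (xs : List β) (acc : List String) :
    xs.foldl (fun langs lang =>
      if f lang ∈ langs then langs else langs ++ [f lang]) acc
    = (xs.map f).foldl PySem.Set.add acc := by
  induction xs generalizing acc with
  | nil => rfl
  | cons x xs ih =>
    simp only [List.foldl_cons, List.map_cons, PySem.Set.add]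
    by_cases h : f x ∈ acc <;> simp [h, ih]

theorem pvUniq_nil : pvUniq [] = [] := pvUniq.eq_1

theorem pvUniq_cons (x : String) (xs : List String) :
    pvUniq (x :: xs) = x :: pvUniq (xs.filter (fun y => y ≠ x)) := pvUniq.eq_2 x xs

-- the Set.add fold from acc is acc followed by the sieve dedup of the unseen elements
theorem foldl_add_eq_uniq : ∀ (xs acc : List String),
    xs.foldl PySem.Set.add acc = acc ++ pvUniq (xs.filter (fun y => ¬ y ∈ acc)) := by
  intro xs
  induction xs with
  | nil => intro acc; simp [pvUniq_nil]
  | cons x xs ih =>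
    intro acc
    rw [List.foldl_cons]
    by_cases h : x ∈ acc
    · have hadd : PySem.Set.add acc x = acc := by simp [PySem.Set.add, h]
      have hcons : (x :: xs).filter (fun y => ¬ y ∈ acc) = xs.filter (fun y => ¬ y ∈ acc) := by
        simp [h]
      rw [hadd, hcons, ih]
    · have hadd : PySem.Set.add acc x = acc ++ [x] := by simp [PySem.Set.add, h]
      have hcons : (x :: xs).filter (fun y => ¬ y ∈ acc) = x :: xs.filter (fun y => ¬ y ∈ acc) := by
        simp [h]
      have hf : xs.filter (fun y => ¬ y ∈ acc ++ [x]) =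
          (xs.filter (fun y => ¬ y ∈ acc)).filter (fun y => y ≠ x) := by
        rw [List.filter_filter]
        congr 1
        funext y
        by_cases h1 : y ∈ acc <;> by_cases h2 : y = x <;> simp [h1, h2]
      rw [hadd, ih (acc ++ [x]), hcons, pvUniq_cons, hf]
      simp

theorem foldl_add_uniq (xs : List String) : xs.foldl PySem.Set.add [] = pvUniq xs := by
  rw [foldl_add_eq_uniq xs []]
  simp

-- core equality between A's loop pipeline and B's scan/map/sieve pipeline, headers generalized
theorem probe_core (con acc : String) (default : List String) :
    (let langs : List String := []
     let langs :=
       if ¬ con = "" then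
         (pvSplit con ",").foldl (fun langs lang =>
           let langcode := PySem.Str.lower ((pvSplit lang "-").headD "")
           if langcode ∈ langs then langs else langs ++ [langcode]) langs
       else langs
     let langs :=
       if ¬ acc = "" then
         (pvSplit acc ",").foldl (fun langs lang =>
           let langcode := PySem.Str.lower ((pvSplit ((pvSplit lang ";").headD "") "-").headD "")
           if langcode ∈ langs then langs else langs ++ [langcode]) langs
       else langs
     if langs.length = 0 then default else langs)
    = (let codes :=
         (if con ≠ "" then (pvSplit con ",").map (fun t => pvCode t ['-']) else []) ++
         (if acc ≠ "" then (pvSplit acc ",").map (fun t => pvCode t [';', '-']) else [])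
       let langs := pvUniq codes
       if langs = [] then default else langs) := by
  by_cases hc : con = "" <;> by_cases ha : acc = ""
  · simp [hc, ha, pvUniq_nil]
  · simp [hc, ha, codeA_content', codeA_accept', foldl_insert_eq_add, List.length_eq_zero_iff]
    rw [foldl_add_uniq]
  · simp [hc, ha, codeA_content', foldl_insert_eq_add, List.length_eq_zero_iff]
    rw [foldl_add_uniq]
  · simp [hc, ha, codeA_content', codeA_accept', foldl_insert_eq_add, ← List.foldl_append,
      List.length_eq_zero_iff]
    rw [foldl_add_uniq]

theorem probe_language_eq (env : List (String × String)) (default : List String) :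
    probe_language env default = probe_language_alt env default := by
  unfold probe_language probe_language_alt pvHeader
  cases hha : pvEnvGet env "HTTP_ACCEPT_LANGUAGE" <;>
  cases hac : pvEnvGet env "ACCEPT_LANGUAGE" <;>
  cases hhc : pvEnvGet env "HTTP_CONTENT_LANGUAGE" <;>
  cases hcc : pvEnvGet env "CONTENT_LANGUAGE" <;>
  · exact probe_core _ _ _

-- ===== VERDICT (by name: the statement is the Claim_ definition above) =====
theorem probe_language_spec : Claim_equal_probe_language := by
  intro env default _
  exact probe_language_eq env default
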